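-- pv_equiv track=rewrite | github.com/CPS-research-group/dtsemnet | dprl/agents/dtsemnet_topk_ablation.py | generate_complete_binary_tree_custom
-- ===== SOURCE A (Python) =====
-- import math
--
-- def generate_complete_binary_tree_custom(num_leaf, dim_out, custom_leaf_actions):
--     leaf_action = [0] * dim_out #info: number of controllers is same as number of leaf nodes
--     height = math.ceil(math.log2(num_leaf))
--     leaf_nodes_lists = []
--     stack = [(0, [], [])]
--
--     controller_num = 0
--
--     while stack:
--         node, left_parents, right_parents = stack.pop()
--
--         left_child = 2 * node + 1
--         right_child = 2 * node + 2
--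
--         if len(left_parents) + len(right_parents) >= height:  # Leaf node
--             leaf_act = leaf_action.copy()
--             leaf_act[custom_leaf_actions[controller_num]] = 1
--             controller_num += 1
--             leaf_nodes_lists.append([left_parents, right_parents, leaf_act])
--         else:
--             stack.append(
--                 (right_child, left_parents.copy(), right_parents + [node]))
--             stack.append(
--                 (left_child, left_parents + [node], right_parents.copy()))
--
--     assert len(leaf_nodes_lists) == num_leaf, 'The number of leaf nodes is not correct'
--
--     return leaf_nodes_lists
-- ===== SOURCE B (Python) =====
-- import math
--
-- def generate_complete_binary_tree_custom(num_leaf, dim_out, custom_leaf_actions):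
--     height = (num_leaf - 1).bit_length()
--     leaf_nodes_lists = []
--     counter = [0]
--
--     def recurse(node, left_parents, right_parents):
--         if len(left_parents) + len(right_parents) >= height:  # leaf
--             act = [0] * dim_out
--             act[custom_leaf_actions[counter[0]]] = 1
--             counter[0] += 1
--             leaf_nodes_lists.append([left_parents, right_parents, act])
--         else:
--             recurse(2 * node + 1, left_parents + [node], right_parents)
--             recurse(2 * node + 2, left_parents, right_parents + [node])
--
--     recurse(0, [], [])
--     assert len(leaf_nodes_lists) == num_leaf, 'The number of leaf nodes is not correct'
--     return leaf_nodes_lists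
-- ===== Notes on version B (the rewrite author's own statement) =====
-- stated objective: idiomatic
-- what changed: The explicit stack loop with pop/push bookkeeping is replaced by a recursive left-first DFS helper that closes over a counter and result list; Pre_ excludes inputs where A raises (num_leaf not a positive power of two -> log2 ValueError or assert failure, or a leaf-action index causing IndexError).
import Mathlib
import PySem

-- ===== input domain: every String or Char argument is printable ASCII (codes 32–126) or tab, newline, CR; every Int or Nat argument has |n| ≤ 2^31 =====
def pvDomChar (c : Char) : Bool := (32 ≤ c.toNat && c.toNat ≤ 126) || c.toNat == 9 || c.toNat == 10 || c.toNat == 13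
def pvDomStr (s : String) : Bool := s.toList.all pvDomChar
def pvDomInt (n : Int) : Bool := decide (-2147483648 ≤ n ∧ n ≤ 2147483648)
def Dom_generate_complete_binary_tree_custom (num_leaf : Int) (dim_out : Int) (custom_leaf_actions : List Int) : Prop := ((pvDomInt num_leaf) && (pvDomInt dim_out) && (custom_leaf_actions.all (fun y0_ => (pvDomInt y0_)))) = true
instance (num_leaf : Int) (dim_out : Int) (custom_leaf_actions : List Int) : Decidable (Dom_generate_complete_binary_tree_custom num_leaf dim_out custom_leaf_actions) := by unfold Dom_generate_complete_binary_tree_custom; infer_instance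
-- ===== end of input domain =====

-- B rewrites A's explicit stack loop as a recursive left-first DFS (idiomatic decomposition; same cost).

-- ===== PORT A =====
-- weight of a stack frame / a stack, used only as the termination measure of A's while loop
def pvDep (f : Int × List Int × List Int) : Int := (f.2.1.length : Int) + (f.2.2.length : Int)
def pvW (h : Int) (f : Int × List Int × List Int) : Nat :=
  if h ≤ pvDep f then 1 else 3 ^ (h - pvDep f).toNat
def pvSW (h : Int) (s : List (Int × List Int × List Int)) : Nat := (s.map (pvW h)).sum

lemma pvW_pos (h : Int) (f : Int × List Int × List Int) : 0 < pvW h f := by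
  unfold pvW; split <;> positivity

lemma pvW_split (h : Int) (node : Int) (lp rp : List Int)
    (hlt : ¬ ((lp.length : Int) + (rp.length : Int) ≥ h)) :
    pvW h (2 * node + 1, lp ++ [node], rp) + pvW h (2 * node + 2, lp, rp ++ [node])
      < pvW h (node, lp, rp) := by
  unfold pvW pvDep
  simp only [List.length_append, List.length_cons, List.length_nil]
  push_cast
  set d : Int := (lp.length : Int) + (rp.length : Int) with hd
  have e1 : (lp.length : Int) + 1 + (rp.length : Int) = d + 1 := by omega
  have e2 : (lp.length : Int) + ((rp.length : Int) + 1) = d + 1 := by omega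
  rw [e1, e2]
  have h1 : ¬ h ≤ d := by omega
  rw [if_neg h1]
  have hk : (h - d).toNat = (h - (d + 1)).toNat + 1 := by omega
  have hpos : 0 < 3 ^ (h - (d + 1)).toNat := by positivity
  rw [hk, pow_succ]
  split
  · have hk0 : (h - (d + 1)).toNat = 0 := by omega
    rw [hk0]; norm_num
  · omega

-- the while loop of A: stack (head = Python top), controller_num, leaf_nodes_lists
def loopA (height : Int) (leaf_action : List Int) (actions : List Int) :
    List (Int × List Int × List Int) → Int → List (List (List Int)) → List (List (List Int))
  | [], _, acc => acc
  | (node, lp, rp) :: rest, c, acc =>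
    if (lp.length : Int) + (rp.length : Int) ≥ height then
      loopA height leaf_action actions rest (c + 1)
        (acc ++ [[lp, rp, PySem.List.pySetD leaf_action (PySem.List.pyGetD actions c 0) 1]])
    else
      loopA height leaf_action actions
        ((2 * node + 1, lp ++ [node], rp) :: (2 * node + 2, lp, rp ++ [node]) :: rest) c acc
termination_by s _ _ => pvSW height s
decreasing_by
  · have := pvW_pos height (node, lp, rp)
    simp [pvSW]; omega
  · have := pvW_split height node lp rp (by assumption)
    simp [pvSW] at *; omega

-- math.ceil(math.log2(num_leaf)): exact for 1 ≤ num_leaf ≤ 2^31 (the claimed domain); Python raises for num_leaf ≤ 0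
def ceilLog2A (num_leaf : Int) : Int :=
  if num_leaf ≤ 1 then 0 else (Nat.log2 (num_leaf - 1).toNat : Int) + 1

def generate_complete_binary_tree_custom (num_leaf : Int) (dim_out : Int) (custom_leaf_actions : List Int) : List (List (List Int)) :=
  let leaf_action : List Int := List.replicate dim_out.toNat 0
  let height := ceilLog2A num_leaf
  loopA height leaf_action custom_leaf_actions [(0, [], [])] 0 []

-- ===== PORT B =====
-- recursive DFS of Source B: returns (leaf rows of this subtree, updated counter)
def dfsB (height dim_out : Int) (actions : List Int) (node : Int) (lp rp : List Int) (c : Int) :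
    List (List (List Int)) × Int :=
  if (lp.length : Int) + (rp.length : Int) ≥ height then
    ([[lp, rp, PySem.List.pySetD (List.replicate dim_out.toNat 0) (PySem.List.pyGetD actions c 0) 1]], c + 1)
  else
    let l := dfsB height dim_out actions (2 * node + 1) (lp ++ [node]) rp c
    let r := dfsB height dim_out actions (2 * node + 2) lp (rp ++ [node]) l.2
    (l.1 ++ r.1, r.2)
termination_by (height - ((lp.length : Int) + (rp.length : Int))).toNat
decreasing_by all_goals (simp only [List.length_append, List.length_cons, List.length_nil]; push_cast; omega)

def generate_complete_binary_tree_custom_alt (num_leaf : Int) (dim_out : Int) (custom_leaf_actions : List Int) : List (List (List Int)) :=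
  let height : Int := (PySem.Int.bitLength (num_leaf - 1) : Int)  -- (num_leaf - 1).bit_length()
  (dfsB height dim_out custom_leaf_actions 0 [] [] 0).1

-- ===== PRECONDITION & SPEC =====
-- Pre_ is exactly where A returns: num_leaf a positive power of two (else math.log2 raises or the
-- assert fails), enough leaf actions, and each used action a valid (possibly negative) Python index.
def Pre_generate_complete_binary_tree_custom (num_leaf : Int) (dim_out : Int) (custom_leaf_actions : List Int) : Prop :=
  0 < num_leaf ∧ num_leaf = (2 : Int) ^ Nat.log2 num_leaf.toNat ∧
  num_leaf ≤ (custom_leaf_actions.length : Int) ∧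
  ∀ x ∈ custom_leaf_actions.take num_leaf.toNat, -dim_out ≤ x ∧ x < dim_out
instance (num_leaf : Int) (dim_out : Int) (custom_leaf_actions : List Int) : Decidable (Pre_generate_complete_binary_tree_custom num_leaf dim_out custom_leaf_actions) := by unfold Pre_generate_complete_binary_tree_custom; infer_instance
def pvWitness_generate_complete_binary_tree_custom : Int × Int × List Int := (4, 2, [0, 1, 1, 0])

def Spec_generate_complete_binary_tree_custom (num_leaf : Int) (dim_out : Int) (custom_leaf_actions : List Int) (out : List (List (List Int))) : Prop := out = generate_complete_binary_tree_custom_alt num_leaf dim_out custom_leaf_actions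
instance (num_leaf : Int) (dim_out : Int) (custom_leaf_actions : List Int) (out : List (List (List Int))) : Decidable (Spec_generate_complete_binary_tree_custom num_leaf dim_out custom_leaf_actions out) := by unfold Spec_generate_complete_binary_tree_custom; infer_instance

-- ===== CLAIM (what is proved, stated in full; the proofs are below) =====
def Claim_equal_generate_complete_binary_tree_custom : Prop := ∀ (num_leaf : Int) (dim_out : Int) (custom_leaf_actions : List Int), Dom_generate_complete_binary_tree_custom num_leaf dim_out custom_leaf_actions → Pre_generate_complete_binary_tree_custom num_leaf dim_out custom_leaf_actions → Spec_generate_complete_binary_tree_custom num_leaf dim_out custom_leaf_actions (generate_complete_binary_tree_custom num_leaf dim_out custom_leaf_actions)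

-- ===== LEMMAS AND PROOFS =====
lemma bitLength_eq_log2 (m : Nat) (h : 0 < m) :
    PySem.Int.bitLength (m : Int) = Nat.log2 m + 1 := by
  induction m using Nat.strong_induction_on with
  | _ m ih =>
    rcases Nat.lt_or_ge m 2 with hm | hm
    · have hm1 : m = 1 := by omega
      subst hm1; decide
    · rw [PySem.Int.bitLength_natCast (by omega : 0 < m), Nat.log2_def]
      have h2 : 0 < m / 2 := by omega
      rw [ih (m / 2) (by omega) h2]
      simp [hm]

lemma height_eq (n : Int) (h : 0 < n) :
    ceilLog2A n = (PySem.Int.bitLength (n - 1) : Int) := by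
  unfold ceilLog2A
  rcases Int.lt_or_le 1 n with h2 | h2
  · have hb := bitLength_eq_log2 (n - 1).toNat (by omega)
    have hc : ((((n - 1).toNat : Nat) : Int)) = n - 1 := by omega
    rw [hc] at hb
    rw [if_neg (by omega), hb]
    push_cast; ring
  · have hn : n = 1 := by omega
    subst hn; simp

-- processing a list of frames left to right with B's DFS, threading the counter
def runFrames (h d : Int) (a : List Int) :
    List (Int × List Int × List Int) → Int → List (List (List Int))
  | [], _ => []
  | f :: fs, c =>
    (dfsB h d a f.1 f.2.1 f.2.2 c).1 ++ runFrames h d a fs (dfsB h d a f.1 f.2.1 f.2.2 c).2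

lemma loopA_eq (h d : Int) (a : List Int) (la : List Int) (hla : la = List.replicate d.toNat 0) :
    ∀ s c acc, loopA h la a s c acc = acc ++ runFrames h d a s c := by
  intro s c acc
  induction s, c, acc using loopA.induct h la a with
  | case1 c acc => simp [loopA, runFrames]
  | case2 node lp rp rest c acc hleaf ih =>
    rw [loopA, if_pos hleaf, ih, runFrames, dfsB, if_pos hleaf]
    simp [hla]
  | case3 node lp rp rest c acc hleaf ih =>
    rw [loopA, if_neg hleaf, ih]
    conv_lhs => rw [runFrames, runFrames]
    conv_rhs => rw [runFrames, dfsB.eq_def]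
    rw [if_neg hleaf]
    simp

-- ===== VERDICT (by name: the statement is the Claim_ definition above) =====
theorem generate_complete_binary_tree_custom_spec : Claim_equal_generate_complete_binary_tree_custom := by
  intro n d a _ hpre
  unfold Spec_generate_complete_binary_tree_custom generate_complete_binary_tree_custom generate_complete_binary_tree_custom_alt
  rw [loopA_eq (ceilLog2A n) d a _ rfl, height_eq n hpre.1]
  simp [runFrames]
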